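-- pv_equiv track=rewrite | github.com/royfisher91-stack/safebite-backend | backend/scripts/product_volume_tracker.py | distinct_products_by_retailer
-- ===== SOURCE A (Python) =====
-- from typing import Any, Dict, Iterable, List, Optional, Sequence, Tuple
--
-- def distinct_products_by_retailer(availability_rows: Iterable[Dict[str, Any]]) -> Dict[str, int]:
--     seen: Dict[str, set] = {}
--     for row in availability_rows:
--         retailer = str(row.get("retailer") or "Unknown").strip() or "Unknown"
--         barcode = str(row.get("barcode") or "").strip()
--         if not barcode:
--             continue
--         seen.setdefault(retailer, set()).add(barcode)
--     return {retailer: len(barcodes) for retailer, barcodes in seen.items()}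
-- ===== SOURCE B (Python) =====
-- def distinct_products_by_retailer(availability_rows):
--     # Normalize once into a flat list of kept (retailer, barcode) rows.
--     kept = []
--     for row in availability_rows:
--         retailer = str(row.get("retailer") or "Unknown").strip() or "Unknown"
--         barcode = str(row.get("barcode") or "").strip()
--         if barcode:
--             kept.append((retailer, barcode))
--     # For each retailer, at its first appearance, recount its distinct
--     # barcodes by scanning the whole normalized list (no maintained sets).
--     result = {}
--     for r, _ in kept:
--         if r not in result:
--             result[r] = len({b for r2, b in kept if r2 == r})
--     return result
-- ===== Notes on version B (the rewrite author's own statement) =====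
-- stated objective: alternative
-- what changed: B drops A's incrementally maintained dict of per-retailer barcode sets: it materializes the normalized kept rows once, then for each retailer at its first appearance recounts that retailer's distinct barcodes by a full rescan of the list (normalize-then-rescan, O(n*k) nested scans).
import Mathlib
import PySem

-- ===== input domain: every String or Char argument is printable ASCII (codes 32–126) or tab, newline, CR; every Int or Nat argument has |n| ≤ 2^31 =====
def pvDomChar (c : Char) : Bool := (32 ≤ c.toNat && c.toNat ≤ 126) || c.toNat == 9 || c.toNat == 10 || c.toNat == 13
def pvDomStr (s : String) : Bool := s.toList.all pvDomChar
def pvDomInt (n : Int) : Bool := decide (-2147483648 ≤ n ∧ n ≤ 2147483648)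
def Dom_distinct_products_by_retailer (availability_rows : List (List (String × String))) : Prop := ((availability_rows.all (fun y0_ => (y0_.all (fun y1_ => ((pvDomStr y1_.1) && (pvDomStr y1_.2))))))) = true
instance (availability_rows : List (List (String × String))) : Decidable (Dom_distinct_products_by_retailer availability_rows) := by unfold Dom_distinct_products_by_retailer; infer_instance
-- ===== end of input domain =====

-- B replaces A's incrementally maintained dict of per-retailer sets with normalize-then-rescan:
-- one flat list of kept rows, then a per-retailer recount by a full scan (objective: alternative).

-- ===== PORT A =====
-- the loop body of A, named (a transcription convenience; same steps, same order)
def pvStepA (seen : PySem.Dict String (PySem.Set String)) (row : List (String × String)) :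
    PySem.Dict String (PySem.Set String) :=
  let retailer :=
    let r0 := match (PySem.Dict.mk row).get? "retailer" with
      | none => "Unknown"                                   -- row.get(...) is None
      | some s => if s == "" then "Unknown" else s          -- ... or "Unknown" (falsy empty string)
    if PySem.Str.strip r0 == "" then "Unknown" else PySem.Str.strip r0
  let barcode := PySem.Str.strip (match (PySem.Dict.mk row).get? "barcode" with
      | none => ""
      | some s => s)                                        -- s or "" = s (identity on strings)
  if barcode == "" then seen                                -- continue
  else seen.modify retailer PySem.Set.empty (fun s => PySem.Set.add s barcode)
      -- seen.setdefault(retailer, set()).add(barcode)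

def distinct_products_by_retailer (availability_rows : List (List (String × String))) :
    List (String × Int) :=
  (availability_rows.foldl pvStepA PySem.Dict.empty).items.map
    (fun p => (p.1, PySem.Set.len p.2))

-- ===== PORT B =====
-- the row normalization of Source B's first loop, named (same steps, same order)
def pvNormRow (row : List (String × String)) : String × String :=
  let retailer :=
    let r0 := match (PySem.Dict.mk row).get? "retailer" with
      | none => "Unknown"
      | some s => if s == "" then "Unknown" else s
    if PySem.Str.strip r0 == "" then "Unknown" else PySem.Str.strip r0
  let barcode := PySem.Str.strip (match (PySem.Dict.mk row).get? "barcode" with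
      | none => ""
      | some s => s)
  (retailer, barcode)

def distinct_products_by_retailer_alt (availability_rows : List (List (String × String))) :
    List (String × Int) :=
  -- pass 1: kept = the normalized (retailer, barcode) rows with a non-empty barcode
  let kept := availability_rows.foldl (fun acc row =>
      let rb := pvNormRow row
      if rb.2 == "" then acc else acc ++ [rb]) []
  -- pass 2: for r, _ in kept: if r not in result: result[r] = len({b for r2, b in kept if r2 == r})
  (kept.foldl (fun d p =>
      if d.contains p.1 then d
      else d.insert p.1
        (PySem.Set.len (PySem.Set.ofList ((kept.filter (fun q => q.1 == p.1)).map Prod.snd))))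
    PySem.Dict.empty).items

-- ===== PRECONDITION & SPEC =====
def Spec_distinct_products_by_retailer (availability_rows : List (List (String × String))) (out : List (String × Int)) : Prop := out = distinct_products_by_retailer_alt availability_rows
instance (availability_rows : List (List (String × String))) (out : List (String × Int)) : Decidable (Spec_distinct_products_by_retailer availability_rows out) := by unfold Spec_distinct_products_by_retailer; infer_instance

-- ===== CLAIM (what is proved, stated in full; the proofs are below) =====
def Claim_equal_distinct_products_by_retailer : Prop := ∀ (availability_rows : List (List (String × String))), Dom_distinct_products_by_retailer availability_rows → Spec_distinct_products_by_retailer availability_rows (distinct_products_by_retailer availability_rows)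

-- ===== LEMMAS AND PROOFS =====

-- the normalised rows that both programs actually act on
def pvKept (rows : List (List (String × String))) : List (String × String) :=
  (rows.map pvNormRow).filter (fun p => !(p.2 == ""))

-- Source B's first loop builds exactly pvKept
theorem pvKeptFold (rows : List (List (String × String))) (acc : List (String × String)) :
    rows.foldl (fun acc row =>
        let rb := pvNormRow row
        if rb.2 == "" then acc else acc ++ [rb]) acc = acc ++ pvKept rows := by
  induction rows generalizing acc with
  | nil => simp [pvKept]
  | cons row t ih =>
    simp only [pvKept, List.map_cons, List.filter_cons, List.foldl_cons] at *
    by_cases h : ((pvNormRow row).2 == "") = true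
    · rw [if_pos h, if_neg (by simp [h]), ih]
    · rw [if_neg h, if_pos (by rw [Bool.not_eq_true] at h; simp [h]), ih, List.append_assoc]
      rfl

-- the grouping step of A's loop, expressed through pvNormRow
theorem pvStepA_eq (seen : PySem.Dict String (PySem.Set String)) (row : List (String × String)) :
    pvStepA seen row =
      if (pvNormRow row).2 == "" then seen
      else seen.modify (pvNormRow row).1 PySem.Set.empty
        (fun s => PySem.Set.add s (pvNormRow row).2) := rfl

def pvGroupStep (d : PySem.Dict String (PySem.Set String)) (p : String × String) :
    PySem.Dict String (PySem.Set String) :=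
  d.modify p.1 PySem.Set.empty (fun s => PySem.Set.add s p.2)

theorem pvFoldA (rows : List (List (String × String))) (d : PySem.Dict String (PySem.Set String)) :
    rows.foldl pvStepA d = (pvKept rows).foldl pvGroupStep d := by
  induction rows generalizing d with
  | nil => rfl
  | cons row t ih =>
    simp only [pvKept, List.map_cons, List.filter_cons, List.foldl_cons] at *
    rw [pvStepA_eq]
    by_cases h : ((pvNormRow row).2 == "") = true
    · rw [if_pos h, if_neg (by simp [h]), ih]
    · rw [if_neg h, if_pos (by rw [Bool.not_eq_true] at h; simp [h]), List.foldl_cons, ih]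
      rfl

-- getD of the grouping fold: per-retailer barcodes, in order
theorem pvGetD_group (l : List (String × String)) (d : PySem.Dict String (PySem.Set String))
    (r : String) :
    (l.foldl pvGroupStep d).getD r PySem.Set.empty
      = PySem.Set.update (d.getD r PySem.Set.empty)
          ((l.filter (fun p => p.1 == r)).map Prod.snd) := by
  induction l generalizing d with
  | nil => simp [PySem.Set.update_nil]
  | cons p t ih =>
    simp only [List.foldl_cons, List.filter_cons]
    rw [ih]
    by_cases hr : r = p.1
    · simp [pvGroupStep, hr, PySem.Set.update_cons]
    · have hr2 : ¬ p.1 = r := fun h => hr h.symm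
      simp [pvGroupStep, PySem.Dict.getD_modify, hr, hr2]

theorem pvKeys_group (l : List (String × String)) (d : PySem.Dict String (PySem.Set String)) :
    (l.foldl pvGroupStep d).keys = PySem.Set.update d.keys (l.map Prod.fst) :=
  PySem.Dict.keys_foldl_modify_key l Prod.fst PySem.Set.empty
    (fun _ p s => PySem.Set.add s p.2) d

theorem pvNodup_keys_group (l : List (String × String)) :
    (l.foldl pvGroupStep PySem.Dict.empty).keys.Nodup :=
  PySem.Dict.nodup_keys_foldl_modify_key l Prod.fst PySem.Set.empty
    (fun _ p s => PySem.Set.add s p.2) PySem.Dict.empty PySem.Dict.nodup_keys_empty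

-- folding Set.add into (a :: s) = a, then folding the non-a elements into s
theorem pvFoldAdd_cons {α : Type} [BEq α] [LawfulBEq α] (a : α) (s : List α) (xs : List α) :
    xs.foldl PySem.Set.add (a :: s) = a :: (xs.filter (fun x => !(x == a))).foldl PySem.Set.add s := by
  induction xs generalizing s with
  | nil => rfl
  | cons x t ih =>
    simp only [List.foldl_cons, List.filter_cons]
    by_cases hx : (x == a) = true
    · have hxa : x = a := by simpa using hx
      rw [if_neg (by simp [hx])]
      have : PySem.Set.add (a :: s) x = a :: s := by
        simp [PySem.Set.add, PySem.Set.contains, hxa]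
      rw [this, ih]
    · have hxa : ¬ x = a := by simpa using hx
      rw [if_pos (by simp [hx]), List.foldl_cons]
      have : PySem.Set.add (a :: s) x = a :: PySem.Set.add s x := by
        by_cases hm : x ∈ s
        · simp [PySem.Set.add, PySem.Set.contains, hm, hxa]
        · simp [PySem.Set.add, PySem.Set.contains, hm, hxa]
      rw [this, ih]

theorem pvOfList_cons {α : Type} [BEq α] [LawfulBEq α] (a : α) (xs : List α) :
    PySem.Set.ofList (a :: xs) = a :: PySem.Set.ofList (xs.filter (fun x => !(x == a))) := by
  show (a :: xs).foldl PySem.Set.add [] = _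
  rw [List.foldl_cons]
  have h1 : PySem.Set.add ([] : List α) a = [a] := rfl
  rw [h1]
  exact pvFoldAdd_cons a [] xs

-- Source B's second loop (insert-if-absent) appends one item per new retailer, in first-occurrence order
theorem pvInsAbsent (kept : List (String × String)) (l : List (String × String))
    (d : PySem.Dict String Int) :
    (l.foldl (fun d p => if d.contains p.1 then d
        else d.insert p.1
          (PySem.Set.len (PySem.Set.ofList ((kept.filter (fun q => q.1 == p.1)).map Prod.snd)))) d).items
      = d.items ++ (PySem.Set.ofList ((l.map Prod.fst).filter (fun r => !(d.contains r)))).map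
          (fun r => (r, PySem.Set.len (PySem.Set.ofList ((kept.filter (fun q => q.1 == r)).map Prod.snd)))) := by
  induction l generalizing d with
  | nil => simp [PySem.Set.ofList]
  | cons p t ih =>
    simp only [List.foldl_cons, List.map_cons, List.filter_cons]
    by_cases hc : d.contains p.1 = true
    · rw [if_pos hc, if_neg (by simp [hc]), ih]
    · have hc' : d.contains p.1 = false := by simpa using hc
      rw [if_neg hc, if_pos (by simp [hc']), ih, pvOfList_cons,
        PySem.Dict.items_insert_of_not_contains _ _ hc']
      simp only [List.map_cons, List.append_assoc, List.singleton_append]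
      have hfilter :
          (t.map Prod.fst).filter (fun r => !((d.insert p.1
              (PySem.Set.len (PySem.Set.ofList ((kept.filter (fun q => q.1 == p.1)).map Prod.snd)))).contains r))
            = ((t.map Prod.fst).filter (fun r => !(d.contains r))).filter
                (fun x => !(x == p.1)) := by
        rw [List.filter_filter]
        refine List.filter_congr (fun r _ => ?_)
        rw [PySem.Dict.contains_insert]
        cases hrp : (r == p.1) <;> cases hdr : d.contains r <;> simp
      rw [hfilter]

theorem distinct_products_by_retailer_eq (rows : List (List (String × String))) :
    distinct_products_by_retailer rows = distinct_products_by_retailer_alt rows := by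
  unfold distinct_products_by_retailer distinct_products_by_retailer_alt
  rw [pvFoldA]
  simp only [pvKeptFold, List.nil_append]
  -- B side
  rw [pvInsAbsent (pvKept rows) (pvKept rows) PySem.Dict.empty]
  have hfilt : ((pvKept rows).map Prod.fst).filter
      (fun r => !((PySem.Dict.empty : PySem.Dict String Int).contains r))
      = (pvKept rows).map Prod.fst := by
    refine List.filter_eq_self.mpr (fun r _ => ?_)
    simp [PySem.Dict.contains_empty]
  rw [hfilt, show (PySem.Dict.empty : PySem.Dict String Int).items = [] from rfl, List.nil_append]
  -- A side: items as keys paired with grouped values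
  rw [PySem.Dict.items_eq_map_keys _ (pvNodup_keys_group (pvKept rows)) PySem.Set.empty]
  rw [pvKeys_group, PySem.Dict.keys_empty, PySem.Set.update_nil_left, List.map_map]
  refine List.map_congr_left (fun r _ => ?_)
  simp only [Function.comp_apply]
  rw [pvGetD_group, PySem.Dict.getD_empty,
    show (PySem.Set.empty : PySem.Set String) = [] from rfl, PySem.Set.update_nil_left]

-- ===== VERDICT (by name: the statement is the Claim_ definition above) =====
theorem distinct_products_by_retailer_spec : Claim_equal_distinct_products_by_retailer := by
  intro rows _
  exact distinct_products_by_retailer_eq rows
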